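-- pv_equiv track=rewrite | github.com/n-evansgibson/3D-vector-grapher | calculator.py | hasMult
-- ===== SOURCE A (Python) =====
-- def hasMult(exp):
--     if '*' in exp: return True
--     vars = ['x', 'y', 'z']
--     for i in range(len(exp) - 1):
--         c1 = exp[i]
--         c2 = exp[i+1]
--         # If either both strings are variables or only one is, return True
--         if (c2 in vars and c1 not in vars) or (c1 in vars and c2 not in vars) or (c1 in vars and c2 in vars):
--             return True
--     return False
-- ===== SOURCE B (Python) =====
-- def hasMult(exp):
--     # The adjacent-pair condition in A reduces to "either char is a variable",
--     # so across the whole scan it is: some char is a variable, provided len >= 2.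
--     return '*' in exp or (len(exp) >= 2 and any(c in ('x', 'y', 'z') for c in exp))
-- ===== Notes on version B (the rewrite author's own statement) =====
-- stated objective: simpler
-- what changed: Replaced the indexed adjacent-pair loop (whose three-way condition reduces to 'either char is a variable') with a single any() over characters guarded by len >= 2.
import Mathlib
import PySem

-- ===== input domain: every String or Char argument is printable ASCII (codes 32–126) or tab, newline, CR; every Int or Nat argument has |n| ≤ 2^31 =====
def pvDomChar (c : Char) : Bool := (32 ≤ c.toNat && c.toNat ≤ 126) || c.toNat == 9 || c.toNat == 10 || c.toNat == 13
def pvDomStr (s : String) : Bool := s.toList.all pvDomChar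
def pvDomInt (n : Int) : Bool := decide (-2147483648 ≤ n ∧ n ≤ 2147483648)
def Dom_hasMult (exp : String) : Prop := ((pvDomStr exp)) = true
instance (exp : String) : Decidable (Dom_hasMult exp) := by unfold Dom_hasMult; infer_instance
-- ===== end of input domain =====

-- B replaces A's indexed adjacent-pair loop with a single per-character any() guarded by len >= 2 (simpler decomposition).


-- ===== PORT A =====
def hasMult (exp : String) : Bool :=
  if PySem.Str.isIn "*" exp then true
  else
    let vars : List Char := ['x', 'y', 'z']
    -- for i in range(len(exp) - 1): indices are always in range, so pyGetD's default is never used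
    (PySem.List.pyRange 0 (PySem.Str.len exp - 1) 1).any (fun i =>
      let c1 := PySem.List.pyGetD exp.toList i ' '
      let c2 := PySem.List.pyGetD exp.toList (i + 1) ' '
      (vars.contains c2 && !vars.contains c1) ||
        (vars.contains c1 && !vars.contains c2) ||
        (vars.contains c1 && vars.contains c2))

-- ===== PORT B =====
def hasMult_alt (exp : String) : Bool :=
  PySem.Str.isIn "*" exp ||
    (decide (2 ≤ PySem.Str.len exp) && exp.toList.any (fun c => ['x', 'y', 'z'].contains c))

-- ===== PRECONDITION & SPEC =====
def Spec_hasMult (exp : String) (out : Bool) : Prop := out = hasMult_alt exp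
instance (exp : String) (out : Bool) : Decidable (Spec_hasMult exp out) := by unfold Spec_hasMult; infer_instance

-- ===== CLAIM (what is proved, stated in full; the proofs are below) =====
def Claim_equal_hasMult : Prop := ∀ (exp : String), Dom_hasMult exp → Spec_hasMult exp (hasMult exp)

-- ===== LEMMAS AND PROOFS =====

-- the three-way pair condition is just "either is a variable"
theorem pv_pair_cond (a b : Bool) : ((b && !a) || (a && !b) || (a && b)) = (a || b) := by
  cases a <;> cases b <;> rfl

-- the adjacent-pair scan over indices equals a per-character scan, guarded by length ≥ 2
theorem pv_scan_eq (cs : List Char) (p : Char → Bool) :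
    ((List.range (cs.length - 1)).any fun k => p (cs.getD k ' ') || p (cs.getD (k + 1) ' '))
      = (decide (2 ≤ cs.length) && cs.any p) := by
  rcases Nat.lt_or_ge cs.length 2 with h | h
  · have h0 : cs.length - 1 = 0 := by omega
    simp [h0, Nat.not_le.mpr h]
  · rw [Bool.eq_iff_iff]
    simp only [List.any_eq_true, List.mem_range, Bool.or_eq_true, Bool.and_eq_true,
      decide_eq_true_eq]
    constructor
    · rintro ⟨k, hk, hp⟩
      refine ⟨h, ?_⟩
      rcases hp with hp | hp
      · exact ⟨cs.getD k ' ', by rw [List.getD_eq_getElem cs ' ' (by omega)]; exact List.getElem_mem _, hp⟩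
      · exact ⟨cs.getD (k + 1) ' ', by rw [List.getD_eq_getElem cs ' ' (by omega)]; exact List.getElem_mem _, hp⟩
    · rintro ⟨-, c, hc, hpc⟩
      obtain ⟨j, hj, rfl⟩ := List.mem_iff_getElem.mp hc
      rcases Nat.lt_or_ge j (cs.length - 1) with hj1 | hj1
      · exact ⟨j, hj1, Or.inl (by rw [List.getD_eq_getElem cs ' ' hj]; exact hpc)⟩
      · refine ⟨cs.length - 2, by omega, Or.inr ?_⟩
        have hj2 : cs.length - 2 + 1 = j := by omega
        rw [hj2, List.getD_eq_getElem cs ' ' hj]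
        exact hpc

-- ===== VERDICT (by name: the statement is the Claim_ definition above) =====
theorem hasMult_spec : Claim_equal_hasMult := by
  intro exp _
  unfold Spec_hasMult hasMult hasMult_alt
  cases hstar : PySem.Str.isIn "*" exp with
  | true => simp
  | false =>
    simp only [Bool.false_or]
    rw [if_neg (by simp)]
    rw [PySem.List.pyRange_one]
    simp only [List.any_map, Int.sub_zero, PySem.Str.len_eq]
    have htn : ((exp.toList.length : Int) - 1).toNat = exp.toList.length - 1 := by omega
    rw [htn]
    norm_cast
    rw [← pv_scan_eq exp.toList (fun c => ['x', 'y', 'z'].contains c)]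
    refine List.any_congr rfl ?_
    intro k
    simp only [Function.comp_apply, Nat.zero_add]
    rw [show ((k : Nat) : Int) + 1 = (((k + 1 : Nat)) : Int) by omega]
    simp only [PySem.List.pyGetD_natCast]
    exact pv_pair_cond _ _
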